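-- pv_equiv track=rewrite | github.com/StackStorm/st2 | st2common/tests/unit/test_operators.py | list_of_dicts_strict_equal
-- ===== SOURCE A (Python) =====
-- def list_of_dicts_strict_equal(lofd1, lofd2):
--     """
--     Ensure that two unordered lists contain the same dicts
--     """
--     t2 = list(lofd2)  # mutable copy
--     if len(lofd1) != len(lofd2):
--         return False
--     for i1, el1 in enumerate(lofd1):
--         for i2, el2 in enumerate(t2):
--             if el1 == el2:
--                 del t2[i2]
--                 break
--         else:
--             return False
--     return not t2
-- ===== SOURCE B (Python) =====
-- def list_of_dicts_strict_equal(lofd1, lofd2):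
--     """
--     Ensure that two unordered lists contain the same dicts
--     """
--     if len(lofd1) != len(lofd2):
--         return False
--     return all(lofd1.count(el) == lofd2.count(el) for el in lofd1) and all(
--         lofd1.count(el) == lofd2.count(el) for el in lofd2
--     )
-- ===== Notes on version B (the rewrite author's own statement) =====
-- stated objective: simpler
-- what changed: Replaces A's destructive find-and-delete matching on a mutable copy of lofd2 with a non-mutating count comparison: after the length guard, B checks that every element of either list occurs equally often (by ==) in both lists.
import Mathlib
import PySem

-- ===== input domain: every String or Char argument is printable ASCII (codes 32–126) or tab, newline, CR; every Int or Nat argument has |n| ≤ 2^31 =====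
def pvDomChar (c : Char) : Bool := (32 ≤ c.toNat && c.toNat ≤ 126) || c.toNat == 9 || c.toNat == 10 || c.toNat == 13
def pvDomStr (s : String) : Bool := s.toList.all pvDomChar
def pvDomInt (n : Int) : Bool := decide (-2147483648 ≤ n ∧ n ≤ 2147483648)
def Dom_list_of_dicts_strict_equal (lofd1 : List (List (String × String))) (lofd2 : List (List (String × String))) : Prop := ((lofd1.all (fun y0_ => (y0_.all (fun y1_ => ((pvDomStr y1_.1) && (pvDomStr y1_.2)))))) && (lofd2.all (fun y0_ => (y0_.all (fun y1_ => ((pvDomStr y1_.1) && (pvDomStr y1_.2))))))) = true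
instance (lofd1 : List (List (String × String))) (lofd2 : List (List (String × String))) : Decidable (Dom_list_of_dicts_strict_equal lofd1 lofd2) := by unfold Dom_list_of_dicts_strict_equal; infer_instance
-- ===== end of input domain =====

-- B replaces A's destructive find-and-delete matching on a mutable copy of lofd2 by a
-- non-mutating occurrence-count comparison (same O(n^2) cost; objective: simpler).

-- Python '==' on two dicts (given here as association lists in insertion order):
-- equal as finite maps, ignoring insertion order; duplicate keys overwrite (dict semantics).
-- Shared by both ports, since both Pythons compare dicts with '=='.
def pyDictEq (d1 d2 : List (String × String)) : Bool :=
  let a := PySem.Dict.ofList d1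
  let b := PySem.Dict.ofList d2
  (a.items.all (fun kv => b.get? kv.1 == some kv.2)) &&
  (b.items.all (fun kv => a.get? kv.1 == some kv.2))

-- ===== PORT A =====
-- inner loop 'for i2, el2 in enumerate(t2): if el1 == el2: del t2[i2]; break / else: return False'
def pvDelFirst (el1 : List (String × String)) (t2 : List (List (String × String))) :
    Option (List (List (String × String))) :=
  match t2 with
  | [] => none
  | el2 :: rest =>
    if pyDictEq el1 el2 then some rest
    else (pvDelFirst el1 rest).map (el2 :: ·)

-- outer loop 'for i1, el1 in enumerate(lofd1): …' carrying the mutable t2; 'return not t2' at the end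
def pvLoopA (lofd1 t2 : List (List (String × String))) : Bool :=
  match lofd1 with
  | [] => t2.isEmpty
  | el1 :: rest =>
    match pvDelFirst el1 t2 with
    | none => false
    | some t2' => pvLoopA rest t2'

def list_of_dicts_strict_equal (lofd1 : List (List (String × String))) (lofd2 : List (List (String × String))) : Bool :=
  if lofd1.length ≠ lofd2.length then false
  else pvLoopA lofd1 lofd2

-- ===== PORT B =====
-- lofd.count(el): occurrences by Python '==' on dicts
def pvCount (l : List (List (String × String))) (el : List (String × String)) : Nat :=
  l.countP (fun x => pyDictEq x el)

def list_of_dicts_strict_equal_alt (lofd1 : List (List (String × String))) (lofd2 : List (List (String × String))) : Bool :=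
  if lofd1.length ≠ lofd2.length then false
  else (lofd1.all (fun el => pvCount lofd1 el == pvCount lofd2 el)) &&
       (lofd2.all (fun el => pvCount lofd1 el == pvCount lofd2 el))

-- ===== PRECONDITION & SPEC =====
def Spec_list_of_dicts_strict_equal (lofd1 : List (List (String × String))) (lofd2 : List (List (String × String))) (out : Bool) : Prop := out = list_of_dicts_strict_equal_alt lofd1 lofd2
instance (lofd1 : List (List (String × String))) (lofd2 : List (List (String × String))) (out : Bool) : Decidable (Spec_list_of_dicts_strict_equal lofd1 lofd2 out) := by unfold Spec_list_of_dicts_strict_equal; infer_instance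

-- ===== CLAIM (what is proved, stated in full; the proofs are below) =====
def Claim_equal_list_of_dicts_strict_equal : Prop := ∀ (lofd1 : List (List (String × String))) (lofd2 : List (List (String × String))), Dom_list_of_dicts_strict_equal lofd1 lofd2 → Spec_list_of_dicts_strict_equal lofd1 lofd2 (list_of_dicts_strict_equal lofd1 lofd2)

-- ===== LEMMAS AND PROOFS =====

theorem pyDictEq_iff (d1 d2 : List (String × String)) :
    pyDictEq d1 d2 = true ↔
      ∀ k, (PySem.Dict.ofList d1).get? k = (PySem.Dict.ofList d2).get? k := by
  simp only [pyDictEq, Bool.and_eq_true, List.all_eq_true, beq_iff_eq]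
  constructor
  · rintro ⟨h1, h2⟩ k
    cases ha : (PySem.Dict.ofList d1).get? k with
    | some v =>
      exact (h1 _ (PySem.Dict.mem_items_of_get?_eq_some _ ha)).symm
    | none =>
      cases hb : (PySem.Dict.ofList d2).get? k with
      | none => rfl
      | some w =>
        have := h2 _ (PySem.Dict.mem_items_of_get?_eq_some _ hb)
        simp only at this
        rw [ha] at this; exact absurd this (by simp)
  · intro h
    refine ⟨fun kv hkv => ?_, fun kv hkv => ?_⟩ <;> obtain ⟨k, v⟩ := kv
    · rw [← h k]
      exact PySem.Dict.get?_of_mem_items _ hkv (PySem.Dict.nodup_keys_ofList d1)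
    · rw [h k]
      exact PySem.Dict.get?_of_mem_items _ hkv (PySem.Dict.nodup_keys_ofList d2)

theorem pyDictEq_refl (d : List (String × String)) : pyDictEq d d = true :=
  (pyDictEq_iff d d).2 (fun _ => rfl)

theorem pyDictEq_symm (a b : List (String × String)) : pyDictEq a b = pyDictEq b a := by
  rw [Bool.eq_iff_iff, pyDictEq_iff, pyDictEq_iff]
  exact ⟨fun h k => (h k).symm, fun h k => (h k).symm⟩

-- if x == y, then 'x == z' and 'y == z' agree for every dict z
theorem pyDictEq_congr_left (x y : List (String × String)) (h : pyDictEq x y = true)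
    (z : List (String × String)) : pyDictEq x z = pyDictEq y z := by
  rw [Bool.eq_iff_iff, pyDictEq_iff, pyDictEq_iff]
  have hxy := (pyDictEq_iff x y).1 h
  exact ⟨fun h' k => (hxy k).symm.trans (h' k), fun h' k => (hxy k).trans (h' k)⟩

theorem pvDelFirst_none (x : List (String × String)) (t2 : List (List (String × String))) :
    pvDelFirst x t2 = none ↔ ∀ y ∈ t2, pyDictEq x y = false := by
  induction t2 with
  | nil => simp [pvDelFirst]
  | cons y rest ih =>
    cases hz : pyDictEq x y with
    | true => simp [pvDelFirst, hz]
    | false => simp [pvDelFirst, hz, ih]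

theorem pvDelFirst_some (x : List (String × String)) (t2 t2' : List (List (String × String)))
    (h : pvDelFirst x t2 = some t2') :
    ∃ y, pyDictEq x y = true ∧ t2.Perm (y :: t2') := by
  induction t2 generalizing t2' with
  | nil => simp [pvDelFirst] at h
  | cons z rest ih =>
    cases hz : pyDictEq x z with
    | true =>
      simp only [pvDelFirst, hz, if_true, Option.some.injEq] at h
      exact ⟨z, hz, by rw [← h]⟩
    | false =>
      simp only [pvDelFirst, hz, Bool.false_eq_true, if_false, Option.map_eq_some_iff] at h
      obtain ⟨r', hr', rfl⟩ := h
      obtain ⟨y, hy, hperm⟩ := ih r' hr'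
      exact ⟨y, hy, ((hperm.cons z).trans (List.Perm.swap y z r'))⟩

-- A's matching loop succeeds iff every '=='-class has the same number of occurrences in both lists
theorem pvLoopA_iff (lofd1 : List (List (String × String))) :
    ∀ t2, pvLoopA lofd1 t2 = true ↔
      ∀ z, lofd1.countP (fun w => pyDictEq w z) = t2.countP (fun w => pyDictEq w z) := by
  induction lofd1 with
  | nil =>
    intro t2
    cases t2 with
    | nil => simp [pvLoopA]
    | cons y ys =>
      simp only [pvLoopA, List.isEmpty_cons, List.countP_nil]
      constructor
      · intro h; exact absurd h (by simp)
      · intro h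
        have := h y
        rw [List.countP_cons] at this
        simp [pyDictEq_refl y] at this
  | cons x rest ih =>
    intro t2
    cases hdel : pvDelFirst x t2 with
    | none =>
      simp only [pvLoopA, hdel]
      constructor
      · intro h; exact absurd h (by simp)
      · intro h
        have h0 : t2.countP (fun w => pyDictEq w x) = 0 := by
          rw [List.countP_eq_zero]
          intro y hy
          rw [← pyDictEq_symm x y]
          simp [(pvDelFirst_none x t2).1 hdel y hy]
        have := h x
        rw [List.countP_cons, h0] at this
        simp [pyDictEq_refl x] at this
    | some t2' =>
      obtain ⟨y, hy, hperm⟩ := pvDelFirst_some x t2 t2' hdel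
      simp only [pvLoopA, hdel, ih t2']
      have hcnt : ∀ z, t2.countP (fun w => pyDictEq w z)
          = t2'.countP (fun w => pyDictEq w z) + (if pyDictEq x z = true then 1 else 0) := by
        intro z
        rw [hperm.countP_eq, List.countP_cons]
        simp only [← pyDictEq_congr_left x y hy z]
      constructor
      · intro h z
        rw [List.countP_cons, hcnt z, h z]
      · intro h z
        have := h z
        rw [List.countP_cons, hcnt z] at this
        omega

-- B's two membership-restricted count checks are equivalent to the unrestricted one
theorem pvAll_iff (l1 l2 : List (List (String × String))) :
    ((∀ z ∈ l1, pvCount l1 z = pvCount l2 z) ∧ (∀ z ∈ l2, pvCount l1 z = pvCount l2 z)) ↔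
      ∀ z, l1.countP (fun w => pyDictEq w z) = l2.countP (fun w => pyDictEq w z) := by
  constructor
  · rintro ⟨h1, h2⟩ z
    by_cases hx : ∃ x ∈ l1, pyDictEq x z = true
    · obtain ⟨x, hxl, hxz⟩ := hx
      have hc : ∀ l : List (List (String × String)),
          l.countP (fun w => pyDictEq w z) = l.countP (fun w => pyDictEq w x) := by
        intro l
        refine List.countP_congr (fun w _ => ?_)
        rw [pyDictEq_symm w z, pyDictEq_symm w x, ← pyDictEq_congr_left x z hxz w]
      rw [hc l1, hc l2]; exact h1 x hxl
    · by_cases hy : ∃ y ∈ l2, pyDictEq y z = true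
      · obtain ⟨y, hyl, hyz⟩ := hy
        have hc : ∀ l : List (List (String × String)),
            l.countP (fun w => pyDictEq w z) = l.countP (fun w => pyDictEq w y) := by
          intro l
          refine List.countP_congr (fun w _ => ?_)
          rw [pyDictEq_symm w z, pyDictEq_symm w y, ← pyDictEq_congr_left y z hyz w]
        rw [hc l1, hc l2]; exact h2 y hyl
      · push Not at hx hy
        rw [List.countP_eq_zero.2 (by intro w hw; simpa using hx w hw),
            List.countP_eq_zero.2 (by intro w hw; simpa using hy w hw)]
  · intro h; exact ⟨fun z _ => h z, fun z _ => h z⟩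

-- ===== VERDICT (by name: the statement is the Claim_ definition above) =====
theorem list_of_dicts_strict_equal_spec : Claim_equal_list_of_dicts_strict_equal := by
  intro lofd1 lofd2 _
  unfold Spec_list_of_dicts_strict_equal list_of_dicts_strict_equal list_of_dicts_strict_equal_alt
  by_cases hlen : lofd1.length ≠ lofd2.length
  · simp [hlen]
  · simp only [hlen, if_false]
    rw [Bool.eq_iff_iff, pvLoopA_iff, ← pvAll_iff lofd1 lofd2]
    simp only [Bool.and_eq_true, List.all_eq_true, beq_iff_eq]
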